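-- pv_equiv track=rewrite | github.com/qjrm1430/joongheon-test | 프로그래머스/3/42579. 베스트앨범/베스트앨범.py | solution
-- ===== SOURCE A (Python) =====
-- def solution(genres, plays):
--     answer = []
--
--     dic1 = {}
--     dic2 = {}
--
--     for i, (genre, play) in enumerate(zip(genres, plays)):
--         if genre not in dic1:
--             dic1[genre] = [(i, play)]
--         else:
--             dic1[genre].append((i, play))
--         if genre not in dic2:
--             dic2[genre] = play
--         else:
--             dic2[genre] += play
--
--     for (k, v) in sorted(dic2.items(), key=lambda x:x[1], reverse=True):
--         for (i, p) in sorted(dic1[k], key=lambda x:x[1], reverse=True)[:2]: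
--             answer.append(i)
--
--     return answer
-- ===== SOURCE B (Python) =====
-- def _push(pair, i, p):
--     # fold one song (index i, play count p) into a genre's running top-2
--     if pair is None or p > pair[0][1]:
--         return ((i, p), None if pair is None else pair[0])
--     if pair[1] is None or p > pair[1][1]:
--         return (pair[0], (i, p))
--     return pair
--
--
-- def solution(genres, plays):
--     # One pass: per-genre totals and per-genre running top-2 selection (no sort of songs).
--     totals = {}
--     top = {}
--     for i, (g, p) in enumerate(zip(genres, plays)):
--         totals[g] = totals.get(g, 0) + p
--         top[g] = _push(top.get(g), i, p)
--     answer = []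
--     for g in sorted(totals, key=totals.get, reverse=True):
--         first, second = top[g]
--         answer.append(first[0])
--         if second is not None:
--             answer.append(second[0])
--     return answer
-- ===== Notes on version B (the rewrite author's own statement) =====
-- stated objective: alternative
-- what changed: Replaces sorting entirely at the song level: instead of grouping (index,play) lists and sorting each genre's list to take its top two, B maintains a per-genre running top-2 pair by a single selection pass over the songs (no song is ever sorted); only the genre totals are sorted at the end.
import Mathlib
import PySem

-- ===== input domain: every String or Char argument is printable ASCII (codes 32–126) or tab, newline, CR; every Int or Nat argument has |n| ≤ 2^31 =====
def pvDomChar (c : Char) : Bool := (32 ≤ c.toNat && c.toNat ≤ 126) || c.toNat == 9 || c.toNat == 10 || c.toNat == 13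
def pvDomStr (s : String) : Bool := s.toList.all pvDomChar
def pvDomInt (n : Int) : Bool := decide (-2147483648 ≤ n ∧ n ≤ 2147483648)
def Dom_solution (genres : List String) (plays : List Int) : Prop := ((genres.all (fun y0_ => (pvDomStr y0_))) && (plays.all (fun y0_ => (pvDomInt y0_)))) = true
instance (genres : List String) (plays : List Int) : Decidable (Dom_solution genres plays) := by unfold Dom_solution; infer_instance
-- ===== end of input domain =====

-- B replaces A's per-genre sorts of the song lists by a single selection pass that maintains
-- each genre's running top-2 pair; only the genre totals are sorted (objective: alternative).
-- ===== PORT A =====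
-- A: per-genre dict of (index, play) lists + per-genre totals; output loop sorts each
-- genre's list by play (reverse) and appends the first two indices.  ([:2] is List.take 2, exact.)
-- dic1[k] in A's output loop cannot raise (k ranges over dic2's keys = dic1's keys), so getD [] is exact there.
def solution (genres : List String) (plays : List Int) : List Int :=
  let pairs := PySem.List.enumerate (genres.zip plays) 0
  let dicts := pairs.foldl
    (fun (d : PySem.Dict String (List (Int × Int)) × PySem.Dict String Int) e =>
      ((if d.1.contains e.2.1 then d.1.insert e.2.1 (d.1.getD e.2.1 [] ++ [(e.1, e.2.2)])
        else d.1.insert e.2.1 [(e.1, e.2.2)]),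
       (if d.2.contains e.2.1 then d.2.insert e.2.1 (d.2.getD e.2.1 0 + e.2.2)
        else d.2.insert e.2.1 e.2.2)))
    (PySem.Dict.empty, PySem.Dict.empty)
  (PySem.List.sorted dicts.2.items (fun x => x.2) true).foldl
    (fun answer kv =>
      ((PySem.List.sorted (dicts.1.getD kv.1 []) (fun x => x.2) true).take 2).foldl
        (fun ans ip => ans ++ [ip.1]) answer) []

-- ===== PORT B =====
-- Source B's _push: fold one song (index i, play p) into a genre's running top-2 pair.
def pvPush (pair : Option ((Int × Int) × Option (Int × Int))) (i p : Int) :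
    (Int × Int) × Option (Int × Int) :=
  match pair with
  | none => ((i, p), none)
  | some fs =>
    if p > fs.1.2 then ((i, p), some fs.1)
    else if (match fs.2 with | none => true | some sv => decide (p > sv.2)) then (fs.1, (i, p))
    else fs

-- B: one pass building totals and the per-genre running top-2 (top[g] = _push(top.get(g), i, p));
-- then the genres sorted by total (reverse) emit their top-2 indices.  top[g] in the output loop
-- cannot raise (g ranges over totals' keys = top's keys), so getD with a dummy default is exact there.
def solution_alt (genres : List String) (plays : List Int) : List Int :=
  let st := (PySem.List.enumerate (genres.zip plays) 0).foldl
    (fun (st : PySem.Dict String Int × PySem.Dict String ((Int × Int) × Option (Int × Int))) e =>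
      (st.1.insert e.2.1 (st.1.getD e.2.1 0 + e.2.2),
       st.2.insert e.2.1 (pvPush (st.2.get? e.2.1) e.1 e.2.2)))
    (PySem.Dict.empty, PySem.Dict.empty)
  (PySem.List.sorted st.1.keys (fun g => st.1.getD g 0) true).foldl
    (fun answer g =>
      let fs := st.2.getD g ((0, 0), none)
      (answer ++ [fs.1.1]) ++ (match fs.2 with | some s => [s.1] | none => [])) []

-- ===== PRECONDITION & SPEC =====
def Spec_solution (genres : List String) (plays : List Int) (out : List Int) : Prop := out = solution_alt genres plays
instance (genres : List String) (plays : List Int) (out : List Int) : Decidable (Spec_solution genres plays out) := by unfold Spec_solution; infer_instance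

-- ===== CLAIM (what is proved, stated in full; the proofs are below) =====
def Claim_equal_solution : Prop := ∀ (genres : List String) (plays : List Int), Dom_solution genres plays → Spec_solution genres plays (solution genres plays)

-- ===== LEMMAS AND PROOFS =====

-- proof helper: the top-2 pair encoded by the first two elements of a list
def pairOf (l : List (Int × Int)) : Option ((Int × Int) × Option (Int × Int)) :=
  match l with
  | [] => none
  | [a] => some (a, none)
  | a :: b :: _ => some (a, some b)

theorem sorted_rev_append_singleton {α : Type} (key : α → Int) (l : List α) (x : α) :
    PySem.List.sorted (l ++ [x]) key true
      = PySem.List.insertBy (fun a b => decide (key b < key a)) x (PySem.List.sorted l key true) := by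
  simp only [PySem.List.sorted_rev_eq_foldl_insertBy, List.foldl_append, List.foldl_cons,
    List.foldl_nil]

theorem insertBy_map {α β : Type} (bef : β → β → Bool) (f : α → β) (x : α) (l : List α) :
    PySem.List.insertBy bef (f x) (l.map f)
      = (PySem.List.insertBy (fun a b => bef (f a) (f b)) x l).map f := by
  induction l with
  | nil => rfl
  | cons y ys ih => by_cases h : bef (f x) (f y) <;> simp [PySem.List.insertBy, h, ih]

theorem sorted_rev_map {α β : Type} (f : α → β) (key : β → Int) (l : List α) :
    PySem.List.sorted (l.map f) key true
      = (PySem.List.sorted l (fun a => key (f a)) true).map f := by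
  induction l using List.reverseRecOn with
  | nil => rfl
  | append_singleton l x ih =>
    rw [List.map_append, List.map_singleton, sorted_rev_append_singleton,
      sorted_rev_append_singleton, ih, insertBy_map]

-- pushing one element into a running top-2 pair = taking the first two of the list
-- with the element inserted at its sorted (play-descending) position
theorem push_pairOf (S : List (Int × Int)) (x : Int × Int) :
    some (pvPush (pairOf (S.take 2)) x.1 x.2)
      = pairOf ((PySem.List.insertBy (fun a b => decide (b.2 < a.2)) x S).take 2) := by
  match S with
  | [] => simp [pairOf, pvPush, PySem.List.insertBy]
  | [a] =>
    by_cases h : a.2 < x.2 <;>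
      simp [pairOf, pvPush, PySem.List.insertBy, h]
  | a :: b :: rest =>
    by_cases h1 : a.2 < x.2
    · simp [pairOf, pvPush, PySem.List.insertBy, h1]
    · by_cases h2 : b.2 < x.2 <;>
        simp [pairOf, pvPush, PySem.List.insertBy, h1, h2]

-- the whole selection fold over a bucket = the top-2 prefix of the sorted bucket
theorem topFold_eq (L : List (Int × Int)) :
    L.foldl (fun acc ip => some (pvPush acc ip.1 ip.2)) none
      = pairOf ((PySem.List.sorted L (fun x => x.2) true).take 2) := by
  induction L using List.reverseRecOn with
  | nil => rfl
  | append_singleton L x ih =>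
    rw [List.foldl_append, List.foldl_cons, List.foldl_nil, ih,
      sorted_rev_append_singleton, push_pairOf]

-- a dict loop 'd[key e] = upd(d.get(key e), e)': each key's final value folds its own elements
theorem get?_foldl_insert_upd {β ν : Type} (key : β → String) (upd : Option ν → β → ν)
    (L : List β) (d : PySem.Dict String ν) (k : String) :
    (L.foldl (fun d e => d.insert (key e) (upd (d.get? (key e)) e)) d).get? k
      = (L.filter (fun e => key e == k)).foldl (fun acc e => some (upd acc e)) (d.get? k) := by
  induction L generalizing d with
  | nil => rfl
  | cons e L ih =>
    rw [List.foldl_cons, ih]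
    by_cases h : key e = k
    · subst h
      simp [PySem.Dict.get?_insert_self]
    · have hne : k ≠ key e := fun hk => h hk.symm
      simp [PySem.Dict.get?_insert_of_ne _ _ hne, h]

-- A's dic2 loop computes the same dict as B's totals loop
theorem dic2_eq_totals (L : List (Int × String × Int)) :
    L.foldl
      (fun (d2 : PySem.Dict String Int) (e : Int × String × Int) =>
        if d2.contains e.2.1 then d2.insert e.2.1 (d2.getD e.2.1 0 + e.2.2)
        else d2.insert e.2.1 e.2.2) PySem.Dict.empty
    = L.foldl (fun (t : PySem.Dict String Int) e => t.insert e.2.1 (t.getD e.2.1 0 + e.2.2))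
        PySem.Dict.empty := by
  apply PySem.List.foldl_congr_mem
  intro acc e _
  by_cases h : acc.contains e.2.1 = true
  · simp [h]
  · rw [Bool.not_eq_true] at h
    simp [h, PySem.Dict.getD_of_not_contains _ _ h]

-- A's dic1 entry at k is the k-bucket of the enumerated songs, in index order
theorem dic1_getD (L : List (String × Int)) (k : String) :
    ((PySem.List.enumerate L 0).foldl
      (fun (d1 : PySem.Dict String (List (Int × Int))) (e : Int × String × Int) =>
        if d1.contains e.2.1 then d1.insert e.2.1 (d1.getD e.2.1 [] ++ [(e.1, e.2.2)])
        else d1.insert e.2.1 [(e.1, e.2.2)]) PySem.Dict.empty).getD k []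
    = ((PySem.List.enumerate L 0).filter (fun e => e.2.1 == k)).map (fun e => (e.1, e.2.2)) := by
  have h1 : (PySem.List.enumerate L 0).foldl
      (fun (d1 : PySem.Dict String (List (Int × Int))) (e : Int × String × Int) =>
        if d1.contains e.2.1 then d1.insert e.2.1 (d1.getD e.2.1 [] ++ [(e.1, e.2.2)])
        else d1.insert e.2.1 [(e.1, e.2.2)]) PySem.Dict.empty
      = ((PySem.List.enumerate L 0).map (fun e => (e.2.1, (e.1, e.2.2)))).foldl
          (fun (d : PySem.Dict String (List (Int × Int))) p => d.modify p.1 [] (fun l => l ++ [p.2]))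
          PySem.Dict.empty := by
    rw [List.foldl_map]
    apply PySem.List.foldl_congr_mem
    intro acc e _
    by_cases h : acc.contains e.2.1 = true
    · simp [PySem.Dict.modify, h]
    · rw [Bool.not_eq_true] at h
      simp [PySem.Dict.modify, h, PySem.Dict.getD_of_not_contains _ _ h]
  rw [h1, PySem.Dict.getD_foldl_modify_append]
  simp [List.filter_map, List.map_map, Function.comp_def]

-- emitting a nonempty bucket's top-2 pair = appending the first two indices of the sorted bucket
theorem emit_pairOf (l : List (Int × Int)) (hl : l ≠ []) (ans : List Int) :
    (ans ++ [((pairOf (l.take 2)).getD ((0, 0), none)).1.1]) ++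
      (match ((pairOf (l.take 2)).getD ((0, 0), none)).2 with | some s => [s.1] | none => [])
    = ans ++ (l.take 2).map (fun ip => ip.1) := by
  match l with
  | [] => exact absurd rfl hl
  | [a] => simp [pairOf]
  | a :: b :: rest => simp [pairOf]

theorem solution_eq (genres : List String) (plays : List Int) :
    solution genres plays = solution_alt genres plays := by
  simp only [solution, solution_alt]
  simp only [PySem.List.foldl_prod_mk
    (f := fun (d1 : PySem.Dict String (List (Int × Int))) (e : Int × String × Int) =>
      if d1.contains e.2.1 then d1.insert e.2.1 (d1.getD e.2.1 [] ++ [(e.1, e.2.2)])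
      else d1.insert e.2.1 [(e.1, e.2.2)])
    (g := fun (d2 : PySem.Dict String Int) (e : Int × String × Int) =>
      if d2.contains e.2.1 then d2.insert e.2.1 (d2.getD e.2.1 0 + e.2.2)
      else d2.insert e.2.1 e.2.2),
    PySem.List.foldl_prod_mk
    (f := fun (t : PySem.Dict String Int) (e : Int × String × Int) =>
      t.insert e.2.1 (t.getD e.2.1 0 + e.2.2))
    (g := fun (d : PySem.Dict String ((Int × Int) × Option (Int × Int))) (e : Int × String × Int) =>
      d.insert e.2.1 (pvPush (d.get? e.2.1) e.1 e.2.2))]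
  rw [dic2_eq_totals (PySem.List.enumerate (genres.zip plays) 0)]
  set L := PySem.List.enumerate (genres.zip plays) 0 with hL
  set T := L.foldl (fun (t : PySem.Dict String Int) e => t.insert e.2.1 (t.getD e.2.1 0 + e.2.2))
    PySem.Dict.empty with hT
  have hnodup : T.keys.Nodup := by
    rw [hT]
    exact PySem.Dict.nodup_keys_foldl_insert_key L (fun e => e.2.1) _ _ PySem.Dict.nodup_keys_empty
  have hkeys : T.keys = PySem.Set.update (PySem.Dict.empty : PySem.Dict String Int).keys
      (L.map (fun e => e.2.1)) := by
    rw [hT]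
    exact PySem.Dict.keys_foldl_insert_key L (fun e => e.2.1) _ _
  rw [PySem.Dict.items_eq_map_keys T hnodup 0, sorted_rev_map, List.foldl_map]
  apply PySem.List.foldl_congr_mem
  intro ans k hk
  have hkmem : k ∈ T.keys := (PySem.List.mem_sorted _ _ _ _).1 hk
  -- the k-bucket is nonempty
  have hbne : L.filter (fun e => e.2.1 == k) ≠ [] := by
    rw [hkeys] at hkmem
    rcases (PySem.Set.mem_update _ _ _).1 hkmem with h | h
    · simp [PySem.Dict.keys_empty] at h
    · rcases List.mem_map.1 h with ⟨e, heL, hek⟩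
      intro hnil
      have : e ∈ L.filter (fun e => e.2.1 == k) := by
        rw [List.mem_filter]
        exact ⟨heL, by simp [hek]⟩
      rw [hnil] at this
      simp at this
  -- B's top entry at k
  have htop : (L.foldl
      (fun (d : PySem.Dict String ((Int × Int) × Option (Int × Int))) (e : Int × String × Int) =>
        d.insert e.2.1 (pvPush (d.get? e.2.1) e.1 e.2.2)) PySem.Dict.empty).get? k
      = pairOf ((PySem.List.sorted
          ((L.filter (fun e => e.2.1 == k)).map (fun e => (e.1, e.2.2))) (fun x => x.2) true).take 2) := by
    rw [get?_foldl_insert_upd (fun e => e.2.1) (fun acc e => pvPush acc e.1 e.2.2) L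
      PySem.Dict.empty k]
    rw [PySem.Dict.get?_empty, ← topFold_eq, List.foldl_map]
  rw [PySem.List.foldl_append_singleton_eq_map (f := fun ip : Int × Int => ip.1),
    dic1_getD (genres.zip plays) k]
  have hsne : PySem.List.sorted ((L.filter (fun e => e.2.1 == k)).map (fun e => (e.1, e.2.2)))
      (fun x => x.2) true ≠ [] := by
    rw [Ne, PySem.List.sorted_eq_nil_iff]
    simp [hbne]
  rw [show ((L.foldl
      (fun (d : PySem.Dict String ((Int × Int) × Option (Int × Int))) (e : Int × String × Int) =>
        d.insert e.2.1 (pvPush (d.get? e.2.1) e.1 e.2.2)) PySem.Dict.empty).getD k ((0, 0), none))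
      = ((pairOf ((PySem.List.sorted
          ((L.filter (fun e => e.2.1 == k)).map (fun e => (e.1, e.2.2))) (fun x => x.2) true).take 2)).getD
          ((0, 0), none)) from by rw [PySem.Dict.getD_eq_get?_getD, htop]]
  rw [emit_pairOf _ hsne]

-- ===== VERDICT (by name: the statement is the Claim_ definition above) =====
theorem solution_spec : Claim_equal_solution := by
  intro genres plays _
  unfold Spec_solution
  exact solution_eq genres plays
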